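-- pv_equiv track=rewrite | github.com/LordOfTheApples123/LaPS_Task_4 | main.py | solution
-- ===== SOURCE A (Python) =====
-- def end_of_sentence(word):
--     letters = []
--     letters[:] = word
--     last_letter = letters.pop()
--     return (last_letter == "!") | (last_letter == "?") | (last_letter == ".")
--
-- def needed_sentence(last_word):
--     letters = []
--     letters[:] = last_word
--     last_letter = letters.pop()
--     return (last_letter == "!") | (last_letter == "?")
--
-- def solution(text):
--     words = text.split(" ")
--     curr_sentence = []
--     result = []
--     for word in words:
--         if end_of_sentence(word):
--             if needed_sentence(word):
--                 curr_sentence.append(word)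
--                 result.append("".join(curr_sentence.copy()))
--             curr_sentence.clear()
--         else:
--             curr_sentence.append(word)
--             curr_sentence.append(" ")
--     return result
-- ===== SOURCE B (Python) =====
-- def solution(text):
--     words = text.split(" ")
--     out = []
--     chunk = []          # words of the sentence currently being collected, in reverse order
--     term = ""           # last letter of the terminator that closes `chunk` ("" = no terminator yet)
--     for w in reversed(words):
--         c = w[-1]
--         if c == "." or c == "!" or c == "?":
--             if term == "!" or term == "?":
--                 out.append(" ".join(reversed(chunk)))
--             chunk = [w]
--             term = c
--         else:
--             chunk.append(w)
--     if term == "!" or term == "?":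
--         out.append(" ".join(reversed(chunk)))
--     out.reverse()
--     return out
-- ===== Notes on version B (the rewrite author's own statement) =====
-- stated objective: alternative
-- what changed: Replaces A's left-to-right state machine (curr_sentence list of words interleaved with explicit " " separator entries, copied and "".join-ed at each keeper terminator) by a right-to-left scan that collects each sentence into a reversed chunk, flushes the finished chunk when the NEXT terminator to its left appears (or at scan end), and builds the result back-to-front, reversing it once at the end.
import Mathlib
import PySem

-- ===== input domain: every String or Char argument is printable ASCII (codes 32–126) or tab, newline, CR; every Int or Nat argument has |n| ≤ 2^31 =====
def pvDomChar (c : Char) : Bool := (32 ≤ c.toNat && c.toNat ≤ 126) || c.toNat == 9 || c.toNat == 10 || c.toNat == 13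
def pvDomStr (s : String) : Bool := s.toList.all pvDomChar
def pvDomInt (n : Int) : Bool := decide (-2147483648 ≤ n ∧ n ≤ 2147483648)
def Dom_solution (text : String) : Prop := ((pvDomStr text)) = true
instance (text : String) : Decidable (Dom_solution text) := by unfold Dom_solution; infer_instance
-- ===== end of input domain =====

-- B replaces A's left-to-right accumulator state machine by a right-to-left scan
-- that flushes each finished sentence chunk at the next terminator to its left
-- and builds the result back-to-front (objective: alternative decomposition).

-- ===== PORT A =====
-- letters[:] = word; letters.pop() raises IndexError on an empty word (outside Pre_); none ↦ false
def pvEndOfSentence (word : String) : Bool :=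
  match PySem.List.pop? word.toList (-1) with
  | some (c, _) => (c == '!') || (c == '?') || (c == '.')
  | none => false

def pvNeededSentence (word : String) : Bool :=
  match PySem.List.pop? word.toList (-1) with
  | some (c, _) => (c == '!') || (c == '?')
  | none => false

def solution (text : String) : List String :=
  let words := (PySem.Str.split? text " ").getD []
  (words.foldl (fun (st : List String × List String) word =>
      if pvEndOfSentence word then
        if pvNeededSentence word then
          ([], st.2 ++ [PySem.Str.join "" (st.1 ++ [word])])
        else ([], st.2)
      else (st.1 ++ [word, " "], st.2)) ([], [])).2

-- ===== PORT B =====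
-- state = (chunk, term, out); Python's term is the 1-char string w[-1] ("" initially),
-- ported as Option Char (none = ""); w[-1] raises IndexError on an empty word (outside Pre_)
def solution_alt (text : String) : List String :=
  let words := (PySem.Str.split? text " ").getD []
  let st := words.reverse.foldl
      (fun (st : List String × Option Char × List String) w =>
        let c := PySem.Str.pyGet? w (-1)
        if c == some '.' || c == some '!' || c == some '?' then
          ([w], c,
           if st.2.1 == some '!' || st.2.1 == some '?' then
             st.2.2 ++ [PySem.Str.join " " st.1.reverse]
           else st.2.2)
        else (st.1 ++ [w], st.2.1, st.2.2)) ([], none, [])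
  (if st.2.1 == some '!' || st.2.1 == some '?' then
     st.2.2 ++ [PySem.Str.join " " st.1.reverse]
   else st.2.2).reverse

-- ===== PRECONDITION & SPEC =====
-- Pre_ excludes exactly the inputs on which Python A raises IndexError (pop from an empty
-- letter list): texts whose split on " " contains an empty word, i.e. empty text,
-- leading/trailing space or a doubled space (B raises IndexError on exactly the same inputs).
def Pre_solution (text : String) : Prop :=
  ∀ w ∈ (PySem.Str.split? text " ").getD [], w ≠ ""
instance (text : String) : Decidable (Pre_solution text) := by unfold Pre_solution; infer_instance

def pvWitness_solution : String := "Hi there! ok. yes?"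

def Spec_solution (text : String) (out : List String) : Prop := out = solution_alt text
instance (text : String) (out : List String) : Decidable (Spec_solution text out) := by unfold Spec_solution; infer_instance

-- ===== CLAIM (what is proved, stated in full; the proofs are below) =====
def Claim_equal_solution : Prop := ∀ (text : String), Dom_solution text → Pre_solution text → Spec_solution text (solution text)

-- ===== LEMMAS AND PROOFS =====

-- last-letter tests, via w[-1]
def pvIsTerm (w : String) : Bool :=
  let c := PySem.Str.pyGet? w (-1)
  c == some '.' || c == some '!' || c == some '?'

def pvIsBang (w : String) : Bool :=
  let c := PySem.Str.pyGet? w (-1)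
  c == some '!' || c == some '?'

-- common reference recursion (left to right over the words)
def pvRec (pend : List String) : List String → List String
  | [] => []
  | w :: rest =>
    if pvIsTerm w then
      (if pvIsBang w then PySem.Str.join " " (pend ++ [w]) :: pvRec [] rest else pvRec [] rest)
    else pvRec (pend ++ [w]) rest

-- curr_sentence in A: each pending word followed by a separate " " entry
def pvInter (S : List String) : List String := S.flatMap (fun s => [s, " "])

def pvStepA (st : List String × List String) (word : String) : List String × List String :=
  if pvEndOfSentence word then
    if pvNeededSentence word then ([], st.2 ++ [PySem.Str.join "" (st.1 ++ [word])])
    else ([], st.2)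
  else (st.1 ++ [word, " "], st.2)

def pvStepB (st : List String × Option Char × List String) (w : String) :
    List String × Option Char × List String :=
  let c := PySem.Str.pyGet? w (-1)
  if c == some '.' || c == some '!' || c == some '?' then
    ([w], c,
     if st.2.1 == some '!' || st.2.1 == some '?' then
       st.2.2 ++ [PySem.Str.join " " st.1.reverse]
     else st.2.2)
  else (st.1 ++ [w], st.2.1, st.2.2)

theorem pvEOS_eq (w : String) : pvEndOfSentence w = pvIsTerm w := by
  unfold pvEndOfSentence pvIsTerm
  have h : PySem.Str.pyGet? w (-1) = w.toList.getLast? := by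
    simp [PySem.Str.pyGet?, PySem.List.pyGet?_neg_one]
  rw [h]
  generalize w.toList = l
  induction l using List.reverseRecOn with
  | nil => rfl
  | append_singleton ys y _ =>
    simp only [PySem.List.pop?_last, List.getLast?_concat]
    cases h1 : y == '.' <;> cases h2 : y == '!' <;> cases h3 : y == '?' <;> simp_all

theorem pvNS_eq (w : String) : pvNeededSentence w = pvIsBang w := by
  unfold pvNeededSentence pvIsBang
  have h : PySem.Str.pyGet? w (-1) = w.toList.getLast? := by
    simp [PySem.Str.pyGet?, PySem.List.pyGet?_neg_one]
  rw [h]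
  generalize w.toList = l
  induction l using List.reverseRecOn with
  | nil => rfl
  | append_singleton ys y _ =>
    simp only [PySem.List.pop?_last, List.getLast?_concat]
    cases h1 : y == '!' <;> cases h2 : y == '?' <;> simp_all

theorem pvJoinConsNe (sep p : List Char) (L : List (List Char)) (h : L ≠ []) :
    PySem.Chars.join sep (p :: L) = p ++ sep ++ PySem.Chars.join sep L := by
  cases L with
  | nil => exact absurd rfl h
  | cons q rest => exact PySem.Chars.join_cons_cons sep p q rest

theorem pvJoin_eq (S : List String) (w : String) :
    PySem.Str.join "" (pvInter S ++ [w]) = PySem.Str.join " " (S ++ [w]) := by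
  rw [← String.toList_inj]
  simp only [PySem.Str.toList_join]
  induction S with
  | nil => simp [pvInter]
  | cons s S ih =>
    have h1 : pvInter (s :: S) = s :: " " :: pvInter S := rfl
    rw [h1]
    simp only [List.cons_append, List.map_cons]
    rw [pvJoinConsNe _ _ _ (by simp), pvJoinConsNe _ _ _ (by simp [pvInter]),
        pvJoinConsNe _ _ _ (by simp), ih]
    simp

-- A's fold computes pvRec
theorem pvFoldA (ws : List String) (pend res : List String) :
    (ws.foldl pvStepA (pvInter pend, res)).2 = res ++ pvRec pend ws := by
  induction ws generalizing pend res with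
  | nil => simp [pvRec]
  | cons w ws ih =>
    rw [List.foldl_cons]
    by_cases ht : pvIsTerm w
    · have ht' : pvEndOfSentence w = true := by rw [pvEOS_eq]; exact ht
      by_cases hb : pvIsBang w
      · have hb' : pvNeededSentence w = true := by rw [pvNS_eq]; exact hb
        have hstep : pvStepA (pvInter pend, res) w
            = ([], res ++ [PySem.Str.join "" (pvInter pend ++ [w])]) := by
          simp [pvStepA, ht', hb']
        rw [hstep, pvJoin_eq]
        have h2 := ih [] (res ++ [PySem.Str.join " " (pend ++ [w])])
        simp only [pvInter, List.flatMap_nil] at h2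
        rw [h2]
        simp [pvRec, ht, hb]
      · have hb' : pvNeededSentence w = false := by rw [pvNS_eq]; simp [hb]
        have hstep : pvStepA (pvInter pend, res) w = ([], res) := by
          simp [pvStepA, ht', hb']
        rw [hstep]
        have h2 := ih [] res
        simp only [pvInter, List.flatMap_nil] at h2
        rw [h2]
        simp [pvRec, ht, hb]
    · have ht' : pvEndOfSentence w = false := by rw [pvEOS_eq]; simp [ht]
      have hstep : pvStepA (pvInter pend, res) w = (pvInter (pend ++ [w]), res) := by
        simp [pvStepA, ht', pvInter]
      rw [hstep, ih]
      simp [pvRec, ht]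

def pvNoTerm (ws : List String) : Prop := ∀ w ∈ ws, pvIsTerm w = false

theorem pvRec_noTerm (ws : List String) (pend : List String) (h : pvNoTerm ws) :
    pvRec pend ws = [] := by
  induction ws generalizing pend with
  | nil => rfl
  | cons w ws ih =>
    have hw : pvIsTerm w = false := h w (by simp)
    simp only [pvRec, hw, Bool.false_eq_true, if_false]
    exact ih _ (fun v hv => h v (by simp [hv]))

theorem pvRec_split (pre : List String) (t : String) (rest : List String) (pend : List String)
    (hpre : pvNoTerm pre) (ht : pvIsTerm t = true) :
    pvRec pend (pre ++ t :: rest)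
      = (if pvIsBang t then [PySem.Str.join " " (pend ++ pre ++ [t])] else []) ++ pvRec [] rest := by
  induction pre generalizing pend with
  | nil =>
    simp only [List.nil_append, pvRec, ht, if_true, List.append_nil]
    by_cases hb : pvIsBang t <;> simp [hb]
  | cons p pre ih =>
    have hp : pvIsTerm p = false := hpre p (by simp)
    simp only [List.cons_append, pvRec, hp, Bool.false_eq_true, if_false]
    rw [ih (pend ++ [p]) (fun v hv => hpre v (by simp [hv]))]
    simp

-- B's fold invariant: the state after scanning ws right-to-left
theorem pvFoldB (ws : List String) :
    (pvNoTerm ws ∧ ws.reverse.foldl pvStepB ([], none, []) = (ws.reverse, none, []))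
    ∨ (∃ pre t rest, ws = pre ++ t :: rest ∧ pvNoTerm pre ∧ pvIsTerm t = true ∧
        ws.reverse.foldl pvStepB ([], none, [])
          = ((pre ++ [t]).reverse, PySem.Str.pyGet? t (-1), (pvRec [] rest).reverse)) := by
  induction ws with
  | nil => exact Or.inl ⟨fun w hw => absurd hw (by simp), rfl⟩
  | cons w ws ih =>
    have hstep : (w :: ws).reverse.foldl pvStepB ([], none, [])
        = pvStepB (ws.reverse.foldl pvStepB ([], none, [])) w := by
      rw [List.reverse_cons, List.foldl_append, List.foldl_cons, List.foldl_nil]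
    by_cases ht : pvIsTerm w = true
    · right
      have hc := ht
      simp only [pvIsTerm, Bool.or_eq_true, beq_iff_eq, PySem.Str.pyGet?_eq, PySem.Chars.pyGet?_eq_listPyGet?] at hc
      rcases ih with ⟨hnt, hst⟩ | ⟨pre, t, rest, hws, hpre, htt, hst⟩
      · refine ⟨[], w, ws, by simp, fun v hv => absurd hv (by simp), ht, ?_⟩
        rw [hstep, hst]
        simp [pvStepB, hc, pvRec_noTerm ws [] hnt]
      · refine ⟨[], w, ws, by simp, fun v hv => absurd hv (by simp), ht, ?_⟩
        rw [hstep, hst]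
        have hrec : pvRec [] ws
            = (if pvIsBang t then [PySem.Str.join " " (pre ++ [t])] else []) ++ pvRec [] rest := by
          rw [hws, pvRec_split pre t rest [] hpre htt]; simp
        by_cases hb : pvIsBang t = true
        · have hbc := hb
          simp only [pvIsBang, Bool.or_eq_true, beq_iff_eq, PySem.Str.pyGet?_eq, PySem.Chars.pyGet?_eq_listPyGet?] at hbc
          simp [pvStepB, hc, hbc, hrec, hb]
        · have hbc := hb
          simp only [pvIsBang, Bool.or_eq_true, beq_iff_eq, PySem.Str.pyGet?_eq, PySem.Chars.pyGet?_eq_listPyGet?, not_or] at hbc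
          simp [pvStepB, hc, hbc.1, hbc.2, hrec, hb]
    · have hc := ht
      simp only [pvIsTerm, Bool.or_eq_true, beq_iff_eq, PySem.Str.pyGet?_eq, PySem.Chars.pyGet?_eq_listPyGet?, not_or] at hc
      rcases ih with ⟨hnt, hst⟩ | ⟨pre, t, rest, hws, hpre, htt, hst⟩
      · left
        refine ⟨fun v hv => ?_, ?_⟩
        · rcases List.mem_cons.mp hv with h | h
          · subst h; simpa using ht
          · exact hnt v h
        · rw [hstep, hst]; simp [pvStepB, hc.1.1, hc.1.2, hc.2]
      · right
        refine ⟨w :: pre, t, rest, by simp [hws], fun v hv => ?_, htt, ?_⟩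
        · rcases List.mem_cons.mp hv with h | h
          · subst h; simpa using ht
          · exact hpre v h
        · rw [hstep, hst]; simp [pvStepB, hc.1.1, hc.1.2, hc.2]

-- ===== VERDICT (by name: the statement is the Claim_ definition above) =====
theorem solution_spec : Claim_equal_solution := by
  intro text _ _
  unfold Spec_solution solution solution_alt
  show (List.foldl pvStepA ([], []) ((PySem.Str.split? text " ").getD [])).2
      = (let st := ((PySem.Str.split? text " ").getD []).reverse.foldl pvStepB ([], none, [])
         (if st.2.1 == some '!' || st.2.1 == some '?' then
            st.2.2 ++ [PySem.Str.join " " st.1.reverse]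
          else st.2.2).reverse)
  generalize ((PySem.Str.split? text " ").getD []) = ws
  have hA := pvFoldA ws [] []
  simp only [pvInter, List.flatMap_nil] at hA
  rw [hA, List.nil_append]
  rcases pvFoldB ws with ⟨hnt, hst⟩ | ⟨pre, t, rest, hws, hpre, htt, hst⟩
  · rw [hst, pvRec_noTerm ws [] hnt]
    simp
  · rw [hst]
    have hrec : pvRec [] ws
        = (if pvIsBang t then [PySem.Str.join " " (pre ++ [t])] else []) ++ pvRec [] rest := by
      rw [hws, pvRec_split pre t rest [] hpre htt]; simp
    by_cases hb : pvIsBang t = true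
    · have hbc := hb
      simp only [pvIsBang, Bool.or_eq_true, beq_iff_eq, PySem.Str.pyGet?_eq, PySem.Chars.pyGet?_eq_listPyGet?] at hbc
      simp [hbc, hrec, hb]
    · have hbc := hb
      simp only [pvIsBang, Bool.or_eq_true, beq_iff_eq, PySem.Str.pyGet?_eq, PySem.Chars.pyGet?_eq_listPyGet?, not_or] at hbc
      simp [hbc.1, hbc.2, hrec, hb]
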